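-- pv_equiv track=rewrite | github.com/allan-tulane/sp25-recitation-08-cwelch2 | main.py | shortest_shortest_path
-- ===== SOURCE A (Python) =====
-- import heapq
--
-- def shortest_shortest_path(graph, source):
--     """
--     Params:
--       graph.....a graph represented as a dict where each key is a vertex
--                 and the value is a set of (vertex, weight) tuples (as in the test case)
--       source....the source node
--
--     Returns:
--       a dict where each key is a vertex and the value is a tuple of
--       (shortest path weight, shortest path number of edges). See test case for example.
--     """
--     # Priority queue holds: (total_weight, num_edges, current_node)
--     heap = [(0, 0, source)]
--
--     # Final result: node → (shortest_weight, fewest_edges)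
--     result = {}
--
--     while heap:
--         total_weight, num_edges, node = heapq.heappop(heap)
--
--         if node in result:
--             continue  # Already visited with the shortest path
--
--         result[node] = (total_weight, num_edges)
--
--         for neighbor, weight in graph.get(node, []):
--             if neighbor not in result:
--                 heapq.heappush(heap, (total_weight + weight, num_edges + 1, neighbor))
--
--     return result
-- ===== SOURCE B (Python) =====
-- def shortest_shortest_path(graph, source):
--     # Heap-free Dijkstra: instead of a lazy priority queue, recompute the frontier
--     # of candidate extensions from the settled set each round and settle its minimum.
--     result = {source: (0, 0)}
--     while True:
--         cands = [(w + wt, e + 1, v)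
--                  for u, (w, e) in result.items()
--                  for v, wt in graph.get(u, [])
--                  if v not in result]
--         if not cands:
--             return result
--         w, e, v = min(cands)
--         result[v] = (w, e)
-- ===== Notes on version B (the rewrite author's own statement) =====
-- stated objective: alternative
-- what changed: Replaces the lazy heap-driven Dijkstra (priority queue of pending entries with stale-entry skipping) by a heap-free selection loop that recomputes the frontier of candidate extensions from the settled set on each round and settles its minimum.
import Mathlib
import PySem

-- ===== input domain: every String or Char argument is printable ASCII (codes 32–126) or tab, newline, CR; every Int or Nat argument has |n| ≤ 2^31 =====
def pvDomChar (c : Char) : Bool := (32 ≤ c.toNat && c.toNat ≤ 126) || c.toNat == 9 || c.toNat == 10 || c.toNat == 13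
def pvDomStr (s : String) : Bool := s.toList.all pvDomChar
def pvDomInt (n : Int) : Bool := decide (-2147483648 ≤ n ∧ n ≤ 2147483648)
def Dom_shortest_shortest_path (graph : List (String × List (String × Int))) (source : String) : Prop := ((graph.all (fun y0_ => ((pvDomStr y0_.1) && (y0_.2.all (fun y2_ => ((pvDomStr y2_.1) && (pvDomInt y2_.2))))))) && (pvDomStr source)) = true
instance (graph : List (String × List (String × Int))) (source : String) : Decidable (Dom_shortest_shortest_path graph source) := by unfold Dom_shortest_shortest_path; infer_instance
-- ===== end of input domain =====

-- B replaces A's lazy heap (priority queue of pending entries, stale entries skipped on pop) by a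
-- heap-free loop that recomputes the frontier candidates from the settled dict each round and
-- settles the minimum; objective: alternative (same results, no priority queue, not faster).

-- ===== PORT A =====
-- shared reading of the Python primitives both programs call:
-- graph.get(u, []) on the dict argument (association list, first match)
def pvGraphGet (graph : List (String × List (String × Int))) (u : String) : List (String × Int) :=
  match graph.find? (fun p => p.1 == u) with
  | some p => p.2
  | none => []

-- Python's '<' on (weight, num_edges, node) tuples (used by heapq in A and by min() in B)
def pvLt (a b : Int × Int × String) : Bool :=
  decide (a.1 < b.1) ||
    (a.1 == b.1 && (decide (a.2.1 < b.2.1) ||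
      (a.2.1 == b.2.1 && decide (a.2.2 < b.2.2))))

def pvMinStep (acc : Option (Int × Int × String)) (x : Int × Int × String) :
    Option (Int × Int × String) :=
  match acc with
  | none => some x
  | some m => if pvLt x m then some x else some m

-- first minimal element (Python's min(); also the value heapq.heappop returns)
def pvMin? (l : List (Int × Int × String)) : Option (Int × Int × String) :=
  l.foldl pvMinStep none

-- heapq.heappop as a multiset operation: remove and return the smallest entry
def pvHeapPop (heap : List (Int × Int × String)) :
    Option ((Int × Int × String) × List (Int × Int × String)) :=
  match pvMin? heap with
  | none => none
  | some m => some (m, heap.erase m)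

-- A's while-loop: pop the smallest entry, skip if visited, else settle and push the neighbours
def pvDijkstra (graph : List (String × List (String × Int))) :
    Nat → List (Int × Int × String) → PySem.Dict String (Int × Int) →
    PySem.Dict String (Int × Int)
  | 0, _, result => result
  | fuel + 1, heap, result =>
    match pvHeapPop heap with
    | none => result
    | some ((w, e, node), rest) =>
      if result.contains node then pvDijkstra graph fuel rest result
      else
        let result' := result.insert node (w, e)
        pvDijkstra graph fuel
          ((pvGraphGet graph node).foldl
            (fun h q => if !result'.contains q.1 then h ++ [(w + q.2, e + 1, q.1)] else h)
            rest)
          result'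

def shortest_shortest_path (graph : List (String × List (String × Int))) (source : String) :
    List (String × Int × Int) :=
  (pvDijkstra graph
      (1 + ((graph.flatMap (fun p => p.2.map Prod.fst)).length + 1) * graph.length)
      [(0, 0, source)] PySem.Dict.empty).items

-- ===== PORT B =====
-- the comprehension building the candidate frontier from the settled dict
def pvCands (graph : List (String × List (String × Int)))
    (result : PySem.Dict String (Int × Int)) : List (Int × Int × String) :=
  result.items.flatMap (fun p =>
    ((pvGraphGet graph p.1).filter (fun q => !result.contains q.1)).map
      (fun q => (p.2.1 + q.2, p.2.2 + 1, q.1)))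

-- B's while-loop: recompute the frontier, stop if empty, else settle its minimum
def pvRelax (graph : List (String × List (String × Int))) :
    Nat → PySem.Dict String (Int × Int) → PySem.Dict String (Int × Int)
  | 0, result => result
  | fuel + 1, result =>
    match pvMin? (pvCands graph result) with
    | none => result
    | some (w, e, v) => pvRelax graph fuel (result.insert v (w, e))

def shortest_shortest_path_alt (graph : List (String × List (String × Int))) (source : String) :
    List (String × Int × Int) :=
  (pvRelax graph ((graph.flatMap (fun p => p.2.map Prod.fst)).length + 1)
      (PySem.Dict.empty.insert source (0, 0))).items

-- ===== PRECONDITION & SPEC =====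
def Spec_shortest_shortest_path (graph : List (String × List (String × Int))) (source : String) (out : List (String × Int × Int)) : Prop := out = shortest_shortest_path_alt graph source
instance (graph : List (String × List (String × Int))) (source : String) (out : List (String × Int × Int)) : Decidable (Spec_shortest_shortest_path graph source out) := by unfold Spec_shortest_shortest_path; infer_instance

-- ===== CLAIM (what is proved, stated in full; the proofs are below) =====
def Claim_equal_shortest_shortest_path : Prop := ∀ (graph : List (String × List (String × Int))) (source : String), Dom_shortest_shortest_path graph source → Spec_shortest_shortest_path graph source (shortest_shortest_path graph source)

-- ===== LEMMAS AND PROOFS =====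

-- all neighbour names occurring in the graph (with multiplicity)
def pvNbrs (graph : List (String × List (String × Int))) : List String :=
  graph.flatMap (fun p => p.2.map Prod.fst)

-- an entry is "fresh" when its node is not settled yet
def pvFresh (r : PySem.Dict String (Int × Int)) (c : Int × Int × String) : Bool :=
  !r.contains c.2.2

-- ---- order facts about pvLt ----

lemma pvLt_iff (a b : Int × Int × String) :
    pvLt a b = true ↔
      (a.1 < b.1 ∨ (a.1 = b.1 ∧ (a.2.1 < b.2.1 ∨ (a.2.1 = b.2.1 ∧ a.2.2 < b.2.2)))) := by
  simp [pvLt]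

lemma pvLt_irrefl (a : Int × Int × String) : pvLt a a = false := by
  simp [pvLt]

lemma pvLt_connex (a b : Int × Int × String) (h : a ≠ b) :
    pvLt a b = true ∨ pvLt b a = true := by
  obtain ⟨a1, a2, a3⟩ := a
  obtain ⟨b1, b2, b3⟩ := b
  rcases lt_trichotomy a1 b1 with h1 | h1 | h1
  · exact Or.inl ((pvLt_iff _ _).mpr (Or.inl h1))
  · rcases lt_trichotomy a2 b2 with h2 | h2 | h2
    · exact Or.inl ((pvLt_iff _ _).mpr (Or.inr ⟨h1, Or.inl h2⟩))
    · rcases lt_trichotomy a3 b3 with h3 | h3 | h3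
      · exact Or.inl ((pvLt_iff _ _).mpr (Or.inr ⟨h1, Or.inr ⟨h2, h3⟩⟩))
      · exact absurd (by simp [h1, h2, h3]) h
      · exact Or.inr ((pvLt_iff _ _).mpr (Or.inr ⟨h1.symm, Or.inr ⟨h2.symm, h3⟩⟩))
    · exact Or.inr ((pvLt_iff _ _).mpr (Or.inr ⟨h1.symm, Or.inl h2⟩))
  · exact Or.inr ((pvLt_iff _ _).mpr (Or.inl h1))

lemma pvLt_antisymm {a b : Int × Int × String} (h1 : pvLt a b = false)
    (h2 : pvLt b a = false) : a = b := by
  by_contra hne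
  rcases pvLt_connex a b hne with h | h
  · rw [h] at h1; cases h1
  · rw [h] at h2; cases h2

lemma pvLt_of_lt_of_nlt {a b c : Int × Int × String} (h1 : pvLt a c = true)
    (h2 : pvLt b c = false) : pvLt a b = true := by
  obtain ⟨a1, a2, a3⟩ := a
  obtain ⟨b1, b2, b3⟩ := b
  obtain ⟨c1, c2, c3⟩ := c
  rw [pvLt_iff] at h1 ⊢
  have h2' : ¬ (b1 < c1 ∨ (b1 = c1 ∧ (b2 < c2 ∨ (b2 = c2 ∧ b3 < c3)))) := by
    intro hx
    rw [(pvLt_iff (b1, b2, b3) (c1, c2, c3)).mpr hx] at h2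
    cases h2
  push_neg at h2'
  obtain ⟨hbc1, hrest⟩ := h2'
  simp only at h1 ⊢
  rcases h1 with h1 | ⟨he1, h1⟩
  · exact Or.inl (lt_of_lt_of_le h1 hbc1)
  · rcases lt_or_eq_of_le hbc1 with hb | hb
    · exact Or.inl (by omega)
    · obtain ⟨hbc2, hrest2⟩ := hrest hb.symm
      rcases h1 with h1 | ⟨he2, h1⟩
      · exact Or.inr ⟨by omega, Or.inl (by omega)⟩
      · rcases lt_or_eq_of_le hbc2 with hb2 | hb2
        · exact Or.inr ⟨by omega, Or.inl (by omega)⟩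
        · have hbc3 := hrest2 hb2.symm
          exact Or.inr ⟨by omega, Or.inr ⟨by omega, lt_of_lt_of_le h1 hbc3⟩⟩

lemma pvLt_asymm {a b : Int × Int × String} (h1 : pvLt a b = true)
    (h2 : pvLt b a = true) : False := by
  obtain ⟨a1, a2, a3⟩ := a
  obtain ⟨b1, b2, b3⟩ := b
  rw [pvLt_iff] at h1 h2
  simp only at h1 h2
  rcases h1 with h | ⟨e1, h⟩ <;> rcases h2 with h' | ⟨e1', h'⟩
  · omega
  · omega
  · omega
  · rcases h with h | ⟨e2, h⟩ <;> rcases h' with h' | ⟨e2', h'⟩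
    · omega
    · omega
    · omega
    · exact lt_asymm h h'

-- ---- min facts ----

lemma pvMinGo : ∀ (l : List (Int × Int × String)) (b : Int × Int × String),
    ∃ m, l.foldl pvMinStep (some b) = some m ∧ (m = b ∨ m ∈ l) ∧ pvLt b m = false ∧
      ∀ x ∈ l, pvLt x m = false := by
  intro l
  induction l with
  | nil => exact fun b => ⟨b, rfl, Or.inl rfl, pvLt_irrefl b, by simp⟩
  | cons x t ih =>
    intro b
    by_cases hx : pvLt x b = true
    · obtain ⟨m, hm, hmem, hmb, hall⟩ := ih x
      refine ⟨m, by simpa [pvMinStep, hx] using hm, ?_, ?_, ?_⟩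
      · rcases hmem with rfl | h
        · exact Or.inr (List.mem_cons_self ..)
        · exact Or.inr (List.mem_cons_of_mem _ h)
      · by_contra hcon
        have hb : pvLt b m = true := by
          revert hcon; cases pvLt b m <;> simp
        exact pvLt_asymm (pvLt_of_lt_of_nlt hb hmb) hx
      · intro y hy
        rcases List.mem_cons.mp hy with rfl | h
        · exact hmb
        · exact hall y h
    · have hx' : pvLt x b = false := by revert hx; cases pvLt x b <;> simp
      obtain ⟨m, hm, hmem, hmb, hall⟩ := ih b
      refine ⟨m, by simpa [pvMinStep, hx'] using hm, ?_, hmb, ?_⟩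
      · rcases hmem with rfl | h
        · exact Or.inl rfl
        · exact Or.inr (List.mem_cons_of_mem _ h)
      · intro y hy
        rcases List.mem_cons.mp hy with rfl | h
        · by_contra hcon
          have hyt : pvLt y m = true := by revert hcon; cases pvLt y m <;> simp
          have := pvLt_of_lt_of_nlt hyt hmb
          rw [this] at hx'
          cases hx'
        · exact hall y h

lemma pvMin?_spec (l : List (Int × Int × String)) (h : l ≠ []) :
    ∃ m, pvMin? l = some m ∧ m ∈ l ∧ ∀ x ∈ l, pvLt x m = false := by
  cases l with
  | nil => exact absurd rfl h
  | cons x t =>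
    obtain ⟨m, hm, hmem, hmb, hall⟩ := pvMinGo t x
    refine ⟨m, ?_, ?_, ?_⟩
    · simpa [pvMin?, pvMinStep] using hm
    · rcases hmem with rfl | hmem
      · exact List.mem_cons_self ..
      · exact List.mem_cons_of_mem _ hmem
    · intro y hy
      rcases List.mem_cons.mp hy with rfl | hy
      · exact hmb
      · exact hall y hy

-- ---- filter counting ----

lemma pv_filter_le {α : Type} {p p' : α → Bool} (himp : ∀ y, p' y = true → p y = true)
    (l : List α) : (l.filter p').length ≤ (l.filter p).length := by
  induction l with
  | nil => simp
  | cons a t ih =>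
    rw [List.filter_cons, List.filter_cons]
    by_cases hpa' : p' a = true
    · rw [if_pos hpa', if_pos (himp a hpa')]
      simpa using ih
    · have h0 : p' a = false := by revert hpa'; cases p' a <;> simp
      rw [if_neg (by simp [h0])]
      cases hpa : p a
      · rw [if_neg (by simp)]
        exact ih
      · rw [if_pos rfl]
        exact Nat.le_succ_of_le ih

lemma pv_filter_lt {α : Type} {p p' : α → Bool} (himp : ∀ y, p' y = true → p y = true)
    {x : α} (hpx : p x = true) (hp'x : p' x = false) :
    ∀ l : List α, x ∈ l → (l.filter p').length < (l.filter p).length := by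
  intro l
  induction l with
  | nil => intro hx; cases hx
  | cons a t ih =>
    intro hx
    rw [List.filter_cons, List.filter_cons]
    rcases List.mem_cons.mp hx with rfl | hx'
    · rw [if_pos hpx, if_neg (by simp [hp'x])]
      exact Nat.lt_succ_of_le (pv_filter_le himp t)
    · by_cases hpa' : p' a = true
      · rw [if_pos hpa', if_pos (himp a hpa')]
        simpa using ih hx'
      · have h0 : p' a = false := by revert hpa'; cases p' a <;> simp
        rw [if_neg (by simp [h0])]
        cases hpa : p a
        · rw [if_neg (by simp)]
          exact ih hx'
        · rw [if_pos rfl]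
          exact Nat.lt_succ_of_lt (ih hx')

-- ---- structure of the candidate list ----

lemma pv_mem_cands {g : List (String × List (String × Int))}
    {r : PySem.Dict String (Int × Int)} {c : Int × Int × String} (hc : c ∈ pvCands g r) :
    r.contains c.2.2 = false ∧ c.2.2 ∈ pvNbrs g := by
  unfold pvCands at hc
  rw [List.mem_flatMap] at hc
  obtain ⟨p, hp, hc⟩ := hc
  rw [List.mem_map] at hc
  obtain ⟨q, hq, rfl⟩ := hc
  rw [List.mem_filter] at hq
  obtain ⟨hqe, hfr⟩ := hq
  refine ⟨by simpa using hfr, ?_⟩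
  unfold pvGraphGet at hqe
  cases hfind : g.find? (fun pr => pr.1 == p.1) with
  | none => rw [hfind] at hqe; cases hqe
  | some p0 =>
    rw [hfind] at hqe
    have hp0 := List.mem_of_find?_eq_some hfind
    exact List.mem_flatMap.mpr ⟨p0, hp0, List.mem_map_of_mem (f := Prod.fst) hqe⟩

lemma pvGraphGet_length_le (g : List (String × List (String × Int))) (u : String) :
    (pvGraphGet g u).length ≤ (pvNbrs g).length := by
  unfold pvGraphGet
  cases hfind : g.find? (fun pr => pr.1 == u) with
  | none => simp
  | some p0 =>
    have hp0 := List.mem_of_find?_eq_some hfind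
    unfold pvNbrs
    rw [List.length_flatMap]
    calc p0.2.length = (p0.2.map Prod.fst).length := by rw [List.length_map]
    _ ≤ _ := List.single_le_sum (by simp) _
      (List.mem_map_of_mem (f := fun p => (p.2.map Prod.fst).length) hp0)

lemma pvGraphGet_of_not_mem {g : List (String × List (String × Int))} {u : String}
    (h : u ∉ g.map Prod.fst) : pvGraphGet g u = [] := by
  unfold pvGraphGet
  rw [List.find?_eq_none.mpr]
  intro p hp
  simp only [beq_iff_eq]
  intro he
  exact h (he ▸ List.mem_map_of_mem (f := Prod.fst) hp)

-- settling a fresh node splits the new frontier: the old frontier minus the entries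
-- aimed at the settled node, followed by the settled node's own out-edges
lemma pvCands_insert (g : List (String × List (String × Int)))
    (r : PySem.Dict String (Int × Int)) (node : String) (w e : Int)
    (h : r.contains node = false) :
    pvCands g (r.insert node (w, e)) =
      (pvCands g r).filter (fun c => !(c.2.2 == node)) ++
        ((pvGraphGet g node).filter (fun q => !(r.insert node (w, e)).contains q.1)).map
          (fun q => (w + q.2, e + 1, q.1)) := by
  unfold pvCands
  rw [PySem.Dict.items_insert_of_not_contains _ _ h]
  rw [List.flatMap_append]
  congr 1
  · induction r.items with
    | nil => simp
    | cons p t ih =>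
      simp only [List.flatMap_cons, List.filter_append, ih]
      congr 1
      rw [List.filter_map]
      have : ((fun c : Int × Int × String => !(c.2.2 == node)) ∘
          (fun q : String × Int => (p.2.1 + q.2, p.2.2 + 1, q.1))) =
          fun q : String × Int => !(q.1 == node) := rfl
      rw [this, List.filter_filter]
      congr 1
      apply List.filter_congr
      intro q _
      simp [PySem.Dict.contains_insert, Bool.and_comm]
  · simp

-- ---- the main loop correspondence ----

lemma pvMain (g : List (String × List (String × Int))) :
    ∀ (fA : Nat) (heap : List (Int × Int × String)) (r : PySem.Dict String (Int × Int))
      (fB : Nat),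
      (heap.filter (pvFresh r)).Perm (pvCands g r) →
      heap.length + ((pvNbrs g).length + 1) *
        ((g.map Prod.fst).filter (fun u => !r.contains u)).length ≤ fA →
      ((pvNbrs g).filter (fun u => !r.contains u)).length + 1 ≤ fB →
      pvDijkstra g fA heap r = pvRelax g fB r := by
  intro fA
  induction fA with
  | zero =>
    intro heap r fB hinv hfA hfB
    have hheap : heap = [] := by
      have := Nat.le_zero.mp hfA
      exact List.length_eq_zero_iff.mp (by omega)
    subst hheap
    have hcands : pvCands g r = [] := by
      simpa using (List.nil_perm.mp (by simpa using hinv.symm))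
    cases fB with
    | zero => rfl
    | succ fB' => simp [pvDijkstra, pvRelax, hcands, pvMin?, pvMinStep]
  | succ n ih =>
    intro heap r fB hinv hfA hfB
    by_cases hheap : heap = []
    · subst hheap
      have hcands : pvCands g r = [] := by
        simpa using (List.nil_perm.mp (by simpa using hinv.symm))
      cases fB with
      | zero => simp [pvDijkstra, pvHeapPop, pvMin?, pvRelax]
      | succ fB' => simp [pvDijkstra, pvHeapPop, pvRelax, hcands, pvMin?, pvMinStep]
    · obtain ⟨m, hm, hmem, hmin⟩ := pvMin?_spec heap hheap
      have hpop : pvHeapPop heap = some (m, heap.erase m) := by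
        simp [pvHeapPop, hm]
      obtain ⟨w, en, node⟩ := m
      have hcons : heap.Perm ((w, en, node) :: heap.erase (w, en, node)) :=
        List.perm_cons_erase hmem
      by_cases hc : r.contains node = true
      · -- stale entry: skip
        have hstep : pvDijkstra g (n + 1) heap r = pvDijkstra g n (heap.erase (w, en, node)) r := by
          simp [pvDijkstra, hpop, hc]
        rw [hstep]
        apply ih _ _ fB _ _ hfB
        · have h1 : (heap.filter (pvFresh r)).Perm
              (((w, en, node) :: heap.erase (w, en, node)).filter (pvFresh r)) :=
            hcons.filter _
          have h2 : ((w, en, node) :: heap.erase (w, en, node)).filter (pvFresh r) =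
              (heap.erase (w, en, node)).filter (pvFresh r) := by
            simp [List.filter_cons, pvFresh, hc]
          exact (h2 ▸ h1).symm.trans hinv
        · have hlen : (heap.erase (w, en, node)).length = heap.length - 1 :=
            List.length_erase_of_mem hmem
          have hpos : 0 < heap.length := List.length_pos_of_ne_nil hheap
          omega
      · -- fresh entry: settle it
        have hc' : r.contains node = false := by revert hc; cases r.contains node <;> simp
        have hfreshm : pvFresh r (w, en, node) = true := by simp [pvFresh, hc']
        have hmc : (w, en, node) ∈ pvCands g r :=
          hinv.mem_iff.mp (List.mem_filter.mpr ⟨hmem, hfreshm⟩)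
        have hcne : pvCands g r ≠ [] := fun h0 => by rw [h0] at hmc; cases hmc
        obtain ⟨c, hcm, hcmem, hcmin⟩ := pvMin?_spec _ hcne
        have hcheap : c ∈ heap := by
          have := hinv.symm.mem_iff.mp hcmem
          exact (List.mem_filter.mp this).1
        have hceq : c = (w, en, node) := pvLt_antisymm (hmin _ hcheap) (hcmin _ hmc)
        subst hceq
        cases fB with
        | zero => omega
        | succ fB' =>
          have hstepB : pvRelax g (fB' + 1) r = pvRelax g fB' (r.insert node (w, en)) := by
            simp [pvRelax, hcm]
          have hstepA : pvDijkstra g (n + 1) heap r =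
              pvDijkstra g n
                (heap.erase (w, en, node) ++
                  ((pvGraphGet g node).filter
                      (fun q => !(r.insert node (w, en)).contains q.1)).map
                    (fun q => (w + q.2, en + 1, q.1)))
                (r.insert node (w, en)) := by
            simp only [pvDijkstra, hpop, hc', Bool.false_eq_true, if_false]
            rw [PySem.List.foldl_append_if]
          rw [hstepA, hstepB]
          set r' := r.insert node (w, en) with hr'
          set pushes := ((pvGraphGet g node).filter (fun q => !r'.contains q.1)).map
            (fun q => (w + q.2, en + 1, q.1)) with hpushes
          have hcontains' : ∀ u, r'.contains u = (u == node || r.contains u) := by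
            intro u; rw [hr']; exact PySem.Dict.contains_insert ..
          -- the new invariant
          have hinv' : ((heap.erase (w, en, node) ++ pushes).filter (pvFresh r')).Perm
              (pvCands g r') := by
            rw [List.filter_append]
            have hpf : pushes.filter (pvFresh r') = pushes := by
              rw [List.filter_eq_self]
              intro c hcp
              rw [hpushes] at hcp
              rw [List.mem_map] at hcp
              obtain ⟨q, hq, rfl⟩ := hcp
              rw [List.mem_filter] at hq
              simpa [pvFresh] using hq.2
            rw [hpf, pvCands_insert g r node w en hc']
            apply List.Perm.append_right
            -- fresh' over erase is (≠ node) over fresh over erase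
            have hsplit : (heap.erase (w, en, node)).filter (pvFresh r') =
                ((heap.erase (w, en, node)).filter (pvFresh r)).filter
                  (fun c => !(c.2.2 == node)) := by
              rw [List.filter_filter]
              apply List.filter_congr
              intro c _
              simp [pvFresh, hcontains', Bool.and_comm]
            rw [hsplit]
            have hx1 : ((w, en, node) :: (heap.erase (w, en, node)).filter (pvFresh r)).Perm
                (pvCands g r) := by
              have h := hcons.filter (pvFresh r)
              simp only [List.filter_cons, hfreshm, if_true] at h
              exact h.symm.trans hinv
            have hx2 : ((heap.erase (w, en, node)).filter (pvFresh r)).Perm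
                ((pvCands g r).erase (w, en, node)) := by
              have := hx1.erase (w, en, node)
              rwa [List.erase_cons_head] at this
            have hx3 : (((heap.erase (w, en, node)).filter (pvFresh r)).filter
                (fun c => !(c.2.2 == node))).Perm
                (((pvCands g r).erase (w, en, node)).filter (fun c => !(c.2.2 == node))) :=
              hx2.filter _
            have hx4 : (((pvCands g r).erase (w, en, node)).filter
                (fun c => !(c.2.2 == node))).Perm
                ((pvCands g r).filter (fun c => !(c.2.2 == node))) := by
              have hc5 : (pvCands g r).Perm
                  ((w, en, node) :: (pvCands g r).erase (w, en, node)) :=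
                List.perm_cons_erase hmc
              have h6 := hc5.filter (fun c => !(c.2.2 == node))
              rw [List.filter_cons, if_neg (by simp)] at h6
              exact h6.symm
            exact hx3.trans hx4
          -- bound bookkeeping
          have hlenerase : (heap.erase (w, en, node)).length = heap.length - 1 :=
            List.length_erase_of_mem hmem
          have hpos : 0 < heap.length := List.length_pos_of_ne_nil hheap
          have hpushlen : pushes.length ≤ (pvGraphGet g node).length := by
            rw [hpushes, List.length_map]
            exact List.length_filter_le _ _
          have himp : ∀ u, (!r'.contains u) = true → (!r.contains u) = true := by
            intro u hu
            rw [hcontains'] at hu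
            simp at hu ⊢
            exact hu.2
          have hfA' : (heap.erase (w, en, node) ++ pushes).length +
              ((pvNbrs g).length + 1) *
                ((g.map Prod.fst).filter (fun u => !r'.contains u)).length ≤ n := by
            rw [List.length_append]
            by_cases hnode : node ∈ g.map Prod.fst
            · have hlt : ((g.map Prod.fst).filter (fun u => !r'.contains u)).length <
                  ((g.map Prod.fst).filter (fun u => !r.contains u)).length :=
                pv_filter_lt himp (by simp [hc']) (by simp [hcontains']) _ hnode
              have hkey : ((pvNbrs g).length + 1) *
                    ((g.map Prod.fst).filter (fun u => !r'.contains u)).length +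
                    ((pvNbrs g).length + 1) ≤
                  ((pvNbrs g).length + 1) *
                    ((g.map Prod.fst).filter (fun u => !r.contains u)).length := by
                calc ((pvNbrs g).length + 1) *
                      ((g.map Prod.fst).filter (fun u => !r'.contains u)).length +
                      ((pvNbrs g).length + 1)
                    = ((pvNbrs g).length + 1) *
                      (((g.map Prod.fst).filter (fun u => !r'.contains u)).length + 1) := by ring
                  _ ≤ _ := Nat.mul_le_mul_left _ (by omega)
              have hdeg : (pvGraphGet g node).length ≤ (pvNbrs g).length :=
                pvGraphGet_length_le g node
              omega
            · have hdeg0 : pushes.length = 0 := by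
                simp [hpushes, pvGraphGet_of_not_mem hnode]
              have hle : ((g.map Prod.fst).filter (fun u => !r'.contains u)).length ≤
                  ((g.map Prod.fst).filter (fun u => !r.contains u)).length :=
                pv_filter_le himp _
              have hkey : ((pvNbrs g).length + 1) *
                    ((g.map Prod.fst).filter (fun u => !r'.contains u)).length ≤
                  ((pvNbrs g).length + 1) *
                    ((g.map Prod.fst).filter (fun u => !r.contains u)).length :=
                Nat.mul_le_mul_left _ hle
              omega
          have hfB' : ((pvNbrs g).filter (fun u => !r'.contains u)).length + 1 ≤ fB' := by
            have hnn : node ∈ pvNbrs g := (pv_mem_cands hmc).2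
            have hlt : ((pvNbrs g).filter (fun u => !r'.contains u)).length <
                ((pvNbrs g).filter (fun u => !r.contains u)).length :=
              pv_filter_lt himp (by simp [hc']) (by simp [hcontains']) _ hnn
            omega
          exact ih _ _ fB' hinv' hfA' hfB'

-- ===== VERDICT (by name: the statement is the Claim_ definition above) =====
theorem shortest_shortest_path_spec : Claim_equal_shortest_shortest_path := by
  intro g s _hdom
  unfold Spec_shortest_shortest_path shortest_shortest_path shortest_shortest_path_alt
  suffices hd : pvDijkstra g
      (1 + ((g.flatMap (fun p => p.2.map Prod.fst)).length + 1) * g.length)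
      [(0, 0, s)] PySem.Dict.empty =
      pvRelax g ((g.flatMap (fun p => p.2.map Prod.fst)).length + 1)
        (PySem.Dict.empty.insert s (0, 0)) by
    rw [hd]
  have hE : (g.flatMap (fun p => p.2.map Prod.fst)) = pvNbrs g := rfl
  rw [hE]
  set E := (pvNbrs g).length with hEdef
  set K := g.length with hKdef
  set r1 := (PySem.Dict.empty : PySem.Dict String (Int × Int)).insert s (0, 0) with hr1
  have hc0 : (PySem.Dict.empty : PySem.Dict String (Int × Int)).contains s = false := by
    simp
  have hfuel : 1 + (E + 1) * K = (E + 1) * K + 1 := by omega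
  rw [hfuel]
  have hpop1 : pvHeapPop [((0 : Int), (0 : Int), s)] = some (((0 : Int), (0 : Int), s), []) := by
    simp [pvHeapPop, pvMin?, pvMinStep]
  have hstep : pvDijkstra g ((E + 1) * K + 1) [((0 : Int), (0 : Int), s)] PySem.Dict.empty =
      pvDijkstra g ((E + 1) * K)
        (((pvGraphGet g s).filter (fun q => !r1.contains q.1)).map
          (fun q => ((0 : Int) + q.2, (0 : Int) + 1, q.1)))
        r1 := by
    simp only [pvDijkstra, hpop1, hc0, Bool.false_eq_true, if_false,
      PySem.List.foldl_append_if, List.nil_append]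
    rfl
  rw [hstep]
  have hr1c : ∀ u, r1.contains u = (u == s) := by
    intro u
    rw [hr1, PySem.Dict.contains_insert]
    simp
  apply pvMain
  · -- initial invariant: the pushed entries are exactly the frontier of {source}
    have hitems : r1.items = [(s, ((0 : Int), (0 : Int)))] := by
      rw [hr1, PySem.Dict.items_insert_of_not_contains _ _ hc0]
      simp [PySem.Dict.empty]
    have hcands : pvCands g r1 =
        ((pvGraphGet g s).filter (fun q => !r1.contains q.1)).map
          (fun q => ((0 : Int) + q.2, (0 : Int) + 1, q.1)) := by
      unfold pvCands
      rw [hitems]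
      simp
    rw [hcands, List.filter_eq_self.mpr]
    · intro c hcp
      rw [List.mem_map] at hcp
      obtain ⟨q, hq, rfl⟩ := hcp
      rw [List.mem_filter] at hq
      simpa [pvFresh] using hq.2
  · -- fuel bound for A
    have hKm : (g.map Prod.fst).length = K := by simp [hKdef]
    by_cases hs : s ∈ g.map Prod.fst
    · have hlt : ((g.map Prod.fst).filter (fun u => !r1.contains u)).length <
          ((g.map Prod.fst).filter (fun _ => true)).length :=
        pv_filter_lt (by simp) rfl (by simp [hr1c]) _ hs
      rw [List.filter_true] at hlt
      have hpl : (((pvGraphGet g s).filter (fun q => !r1.contains q.1)).map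
          (fun q => ((0 : Int) + q.2, (0 : Int) + 1, q.1))).length ≤ E := by
        rw [List.length_map]
        calc ((pvGraphGet g s).filter (fun q => !r1.contains q.1)).length
            ≤ (pvGraphGet g s).length := List.length_filter_le _ _
          _ ≤ E := pvGraphGet_length_le g s
      have hkey : (E + 1) * ((g.map Prod.fst).filter (fun u => !r1.contains u)).length +
          (E + 1) ≤ (E + 1) * K := by
        calc (E + 1) * ((g.map Prod.fst).filter (fun u => !r1.contains u)).length + (E + 1)
            = (E + 1) * (((g.map Prod.fst).filter (fun u => !r1.contains u)).length + 1) := by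
              ring
          _ ≤ (E + 1) * K := Nat.mul_le_mul_left _ (by omega)
      rw [hKm] at hlt
      simp only [← hEdef]
      omega
    · have hp0 : pvGraphGet g s = [] := pvGraphGet_of_not_mem hs
      have hle : ((g.map Prod.fst).filter (fun u => !r1.contains u)).length ≤ K := by
        calc ((g.map Prod.fst).filter (fun u => !r1.contains u)).length
            ≤ (g.map Prod.fst).length := List.length_filter_le _ _
          _ = K := hKm
      have hkey : (E + 1) * ((g.map Prod.fst).filter (fun u => !r1.contains u)).length ≤
          (E + 1) * K := Nat.mul_le_mul_left _ hle
      simp only [← hEdef, hp0]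
      simp
      omega
  · -- fuel bound for B
    have := List.length_filter_le (fun u => !r1.contains u) (pvNbrs g)
    omega
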